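-- pv_equiv track=rewrite | github.com/Siddhraj26/internship | test.py | divisible_three
-- ===== SOURCE A (Python) =====
-- def divisible_three(numbers):
--     result = {"even": [], "odd": []}
--     for num in numbers:
--         if num % 3 == 0:
--             if num % 2 == 0:
--                 result["even"].append(num)
--             else:
--                 result["odd"].append(num)
--     return result
-- ===== SOURCE B (Python) =====
-- def divisible_three(numbers):
--     return {
--         "even": [n for n in numbers if n % 6 == 0],
--         "odd": [n for n in numbers if n % 6 == 3],
--     }
-- ===== Notes on version B (the rewrite author's own statement) =====
-- stated objective: simpler
-- what changed: Replaces the single bucketing pass with nested divisibility tests by two independent filters using the closed-form conditions n % 6 == 0 (multiple of 3 and even) and n % 6 == 3 (multiple of 3 and odd).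
import Mathlib
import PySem

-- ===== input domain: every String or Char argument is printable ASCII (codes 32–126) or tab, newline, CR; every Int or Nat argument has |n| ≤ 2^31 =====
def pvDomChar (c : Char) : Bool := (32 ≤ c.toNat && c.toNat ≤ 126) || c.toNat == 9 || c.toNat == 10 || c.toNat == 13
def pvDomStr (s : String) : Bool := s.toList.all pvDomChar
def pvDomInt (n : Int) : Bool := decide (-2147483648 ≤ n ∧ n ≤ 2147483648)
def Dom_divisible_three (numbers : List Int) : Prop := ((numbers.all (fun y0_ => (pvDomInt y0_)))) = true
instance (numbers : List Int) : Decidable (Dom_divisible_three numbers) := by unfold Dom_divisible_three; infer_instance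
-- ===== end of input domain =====

-- B replaces A's single bucketing pass (nested %3/%2 tests appending into a dict) by two
-- independent filters with the closed-form tests n % 6 == 0 and n % 6 == 3 (objective: simpler).

-- ===== PORT A =====
-- The dict {"even": [], "odd": []} is the fixed-key pair (even, odd); appends update its components;
-- returned in insertion order as the association list. Python `%` with positive divisor = PySem.Int.mod.
def divisible_three (numbers : List Int) : List (String × List Int) :=
  let r := numbers.foldl
    (fun (p : List Int × List Int) num =>
      if PySem.Int.mod num 3 == 0 then
        if PySem.Int.mod num 2 == 0 then (p.1 ++ [num], p.2)
        else (p.1, p.2 ++ [num])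
      else p)
    ([], [])
  [("even", r.1), ("odd", r.2)]

-- ===== PORT B =====
def divisible_three_alt (numbers : List Int) : List (String × List Int) :=
  [("even", numbers.filter (fun n => PySem.Int.mod n 6 == 0)),
   ("odd",  numbers.filter (fun n => PySem.Int.mod n 6 == 3))]

-- ===== PRECONDITION & SPEC =====
def Spec_divisible_three (numbers : List Int) (out : List (String × List Int)) : Prop := out = divisible_three_alt numbers
instance (numbers : List Int) (out : List (String × List Int)) : Decidable (Spec_divisible_three numbers out) := by unfold Spec_divisible_three; infer_instance

-- ===== CLAIM (what is proved, stated in full; the proofs are below) =====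
def Claim_equal_divisible_three : Prop := ∀ (numbers : List Int), Dom_divisible_three numbers → Spec_divisible_three numbers (divisible_three numbers)

-- ===== LEMMAS AND PROOFS =====

theorem divisible_three_mod_even (n : Int) :
    ((PySem.Int.mod n 3 == 0) && (PySem.Int.mod n 2 == 0)) = (PySem.Int.mod n 6 == 0) := by
  have h3 : PySem.Int.mod n 3 = n % 3 := PySem.Int.mod_eq_emod_of_pos (by norm_num)
  have h2 : PySem.Int.mod n 2 = n % 2 := PySem.Int.mod_eq_emod_of_pos (by norm_num)
  have h6 : PySem.Int.mod n 6 = n % 6 := PySem.Int.mod_eq_emod_of_pos (by norm_num)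
  rw [h3, h2, h6, Bool.eq_iff_iff]
  simp only [Bool.and_eq_true, beq_iff_eq]
  omega

theorem divisible_three_mod_odd (n : Int) :
    ((PySem.Int.mod n 3 == 0) && !(PySem.Int.mod n 2 == 0)) = (PySem.Int.mod n 6 == 3) := by
  have h3 : PySem.Int.mod n 3 = n % 3 := PySem.Int.mod_eq_emod_of_pos (by norm_num)
  have h2 : PySem.Int.mod n 2 = n % 2 := PySem.Int.mod_eq_emod_of_pos (by norm_num)
  have h6 : PySem.Int.mod n 6 = n % 6 := PySem.Int.mod_eq_emod_of_pos (by norm_num)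
  rw [h3, h2, h6, Bool.eq_iff_iff]
  simp only [Bool.and_eq_true, Bool.not_eq_true', beq_iff_eq, beq_eq_false_iff_ne]
  omega

theorem divisible_three_fold (numbers : List Int) (a b : List Int) :
    numbers.foldl
      (fun (p : List Int × List Int) num =>
        if PySem.Int.mod num 3 == 0 then
          if PySem.Int.mod num 2 == 0 then (p.1 ++ [num], p.2)
          else (p.1, p.2 ++ [num])
        else p)
      (a, b)
    = (a ++ numbers.filter (fun n => PySem.Int.mod n 6 == 0),
       b ++ numbers.filter (fun n => PySem.Int.mod n 6 == 3)) := by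
  induction numbers generalizing a b with
  | nil => simp
  | cons x xs ih =>
    simp only [List.foldl_cons, List.filter_cons]
    rw [← divisible_three_mod_even x, ← divisible_three_mod_odd x]
    cases h3 : (PySem.Int.mod x 3 == 0) <;> cases h2 : (PySem.Int.mod x 2 == 0) <;>
      simp only [h3, h2, Bool.and_true, Bool.and_false, Bool.not_true, Bool.not_false,
        Bool.false_eq_true, if_true, if_false, ih] <;>
      simp [List.append_assoc]

-- ===== VERDICT (by name: the statement is the Claim_ definition above) =====
theorem divisible_three_spec : Claim_equal_divisible_three := by
  intro numbers _
  unfold Spec_divisible_three divisible_three divisible_three_alt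
  rw [divisible_three_fold]
  simp
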